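-- pv_equiv track=rewrite | github.com/llouis0622/Algorithm_Deep_Dive | Baekjoon/Gold/V/BOJ1790.py | search
-- ===== SOURCE A (Python) =====
-- def search(n, k):
--     length = 0
--     num = 1
--     cnt = 9
--     while length + num * cnt < k and n >= 10 ** (num - 1):
--         length += num * cnt
--         num += 1
--         cnt *= 10
--     if length + num * (n - 10 ** (num - 1) + 1) < k:
--         return -1
--     temp = k - length - 1
--     start = 10 ** (num - 1)
--     number = start + temp // num
--     return int(str(number)[temp % num])
-- ===== SOURCE B (Python) =====
-- def _digits_upto(m):
--     # total number of digits in the concatenation of 1..m (0 for m < 1)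
--     total = 0
--     p = 1
--     d = 1
--     while p <= m:
--         hi = p * 10 - 1
--         if hi > m:
--             hi = m
--         total += d * (hi - p + 1)
--         p *= 10
--         d += 1
--     return total
--
--
-- def search(n, k):
--     if k < 1 or _digits_upto(n) < k:
--         return -1
--     # binary search for the smallest m in [1, n] whose prefix 1..m contains position k
--     lo, hi = 1, n
--     while lo < hi:
--         mid = (lo + hi) // 2
--         if _digits_upto(mid) >= k:
--             hi = mid
--         else:
--             lo = mid + 1
--     idx = k - _digits_upto(lo - 1) - 1
--     return int(str(lo)[idx])
-- ===== Notes on version B (the rewrite author's own statement) =====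
-- stated objective: alternative
-- what changed: B computes the k-th digit by binary search on the number m (smallest m with digit-count(1..m) >= k, using a closed-form digit-count helper), instead of A's single walk over digit-length blocks with arithmetic block location.
-- outside the precondition, e.g. on search(5, 0): A returns 0, B returns -1; on search(5, -1): A raises ValueError, B returns -1
import Mathlib
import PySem

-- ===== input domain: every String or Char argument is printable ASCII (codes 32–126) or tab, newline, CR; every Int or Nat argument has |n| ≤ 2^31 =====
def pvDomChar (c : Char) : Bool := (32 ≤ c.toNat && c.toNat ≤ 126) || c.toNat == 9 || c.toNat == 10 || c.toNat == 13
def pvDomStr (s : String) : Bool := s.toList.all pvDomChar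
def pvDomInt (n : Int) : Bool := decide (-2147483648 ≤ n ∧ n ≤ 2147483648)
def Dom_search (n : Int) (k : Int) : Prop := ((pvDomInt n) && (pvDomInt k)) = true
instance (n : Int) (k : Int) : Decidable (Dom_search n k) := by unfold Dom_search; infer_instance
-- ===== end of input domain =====

-- B locates the k-th digit by binary search for the smallest number m whose prefix 1..m covers
-- position k (with a digit-count helper), instead of A's single block-walking loop; alternative algorithm.


-- ===== PORT A =====
-- A's while loop; num is kept as e + 1 with e : Nat, so 10 ** (num - 1) is (10:Int) ^ e (exact: num only takes values ≥ 1)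
def searchLoopA (n k : Int) (length : Int) (e : Nat) (cnt : Int) : Int × Nat × Int :=
  if length + ((e : Int) + 1) * cnt < k ∧ (10 : Int) ^ e ≤ n then
    searchLoopA n k (length + ((e : Int) + 1) * cnt) (e + 1) (cnt * 10)
  else (length, e, cnt)
termination_by ((n + 1) - (10 : Int) ^ e).toNat
decreasing_by
  have h1 : (1 : Int) ≤ (10 : Int) ^ e := one_le_pow₀ (by norm_num)
  have h2 : ((10 : Int) ^ (e + 1)) = (10 : Int) ^ e * 10 := pow_succ 10 e
  omega

def search (n : Int) (k : Int) : Int :=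
  let r := searchLoopA n k 0 0 9
  let length := r.1
  let e := r.2.1
  let num : Int := (e : Int) + 1
  if length + num * (n - (10 : Int) ^ e + 1) < k then -1
  else
    let temp := k - length - 1
    let start := (10 : Int) ^ e
    let number := start + PySem.Int.floordiv temp num
    -- int(str(number)[temp % num]); none branches are unreachable under Pre_search
    match PySem.List.pyGet? (PySem.Int.toChars number) (PySem.Int.mod temp num) with
    | some c => (PySem.Int.ofChars? [c]).getD 0
    | none => 0

-- ===== PORT B =====
-- Source B's _digits_upto: total digits of the concatenation 1..m; the variables p = 10 ^ e and
-- d = e + 1 are kept as functions of e : Nat (exact: they only take those values)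
def digitsUpto (m : Int) (total : Int) (e : Nat) : Int :=
  if (10 : Int) ^ e ≤ m then
    digitsUpto m (total + ((e : Int) + 1) * (min ((10 : Int) ^ (e + 1) - 1) m - (10 : Int) ^ e + 1)) (e + 1)
  else total
termination_by ((m + 1) - (10 : Int) ^ e).toNat
decreasing_by
  have h1 : (1 : Int) ≤ (10 : Int) ^ e := one_le_pow₀ (by norm_num)
  have h2 : ((10 : Int) ^ (e + 1)) = (10 : Int) ^ e * 10 := pow_succ 10 e
  omega

-- Source B's binary-search while loop
def bsearchB (k : Int) (lo hi : Int) : Int :=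
  if lo < hi then
    if k ≤ digitsUpto (PySem.Int.floordiv (lo + hi) 2) 0 0 then
      bsearchB k lo (PySem.Int.floordiv (lo + hi) 2)
    else bsearchB k (PySem.Int.floordiv (lo + hi) 2 + 1) hi
  else lo
termination_by (hi - lo).toNat
decreasing_by
  all_goals
    have hd : PySem.Int.floordiv (lo + hi) 2 = (lo + hi) / 2 :=
      PySem.Int.floordiv_eq_ediv_of_pos (by norm_num)
  all_goals rw [hd] <;> omega

def search_alt (n : Int) (k : Int) : Int :=
  if k < 1 ∨ digitsUpto n 0 0 < k then -1
  else
    let m := bsearchB k 1 n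
    let idx := k - digitsUpto (m - 1) 0 0 - 1
    -- int(str(m)[idx]); none branch unreachable under Pre_search
    match PySem.List.pyGet? (PySem.Int.toChars m) idx with
    | some c => (PySem.Int.ofChars? [c]).getD 0
    | none => 0

-- ===== PRECONDITION & SPEC =====
-- Pre_ excludes k ≤ 0, where A either raises ValueError (int('-') on a negative number's sign) or returns an
-- accidental value (0 at k = 0 from indexing str(0)) that is an artefact of its unguarded arithmetic.
def Pre_search (n : Int) (k : Int) : Prop := 1 ≤ k
instance (n : Int) (k : Int) : Decidable (Pre_search n k) := by unfold Pre_search; infer_instance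
def pvWitness_search : Int × Int := (10, 5)

def Spec_search (n : Int) (k : Int) (out : Int) : Prop := out = search_alt n k
instance (n : Int) (k : Int) (out : Int) : Decidable (Spec_search n k out) := by unfold Spec_search; infer_instance

-- ===== CLAIM (what is proved, stated in full; the proofs are below) =====
def Claim_equal_search : Prop := ∀ (n : Int) (k : Int), Dom_search n k → Pre_search n k → Spec_search n k (search n k)

-- ===== LEMMAS AND PROOFS =====

-- digits in the concatenation of all numbers with fewer than e+1 digits (full blocks 1..e)
def fullB : Nat → Int
  | 0 => 0
  | e + 1 => fullB e + ((e : Int) + 1) * 9 * (10 : Int) ^ e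

lemma pow10_pos (e : Nat) : (0 : Int) < (10 : Int) ^ e := pow_pos (by norm_num) e

lemma fullB_lt_succ (e : Nat) : fullB e < fullB (e + 1) := by
  have := pow10_pos e
  have h3 : (0 : Int) ≤ (e : Int) := Int.natCast_nonneg e
  simp only [fullB]
  nlinarith

-- digitsUpto is additive in its accumulator
lemma digitsUpto_add_aux (n : Int) : ∀ (m : Nat) (t : Int) (e : Nat), ((n + 1) - (10 : Int) ^ e).toNat ≤ m →
    digitsUpto n t e = t + digitsUpto n 0 e := by
  intro m
  induction m with
  | zero =>
    intro t e hm
    have h1 : (1 : Int) ≤ (10 : Int) ^ e := one_le_pow₀ (by norm_num)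
    have hn : ¬ ((10 : Int) ^ e ≤ n) := by omega
    rw [digitsUpto]; conv_rhs => rw [digitsUpto]
    simp [hn]
  | succ m ih =>
    intro t e hm
    rw [digitsUpto]; conv_rhs => rw [digitsUpto]
    by_cases h : (10 : Int) ^ e ≤ n
    · have h1 : (1 : Int) ≤ (10 : Int) ^ e := one_le_pow₀ (by norm_num)
      have hp : (10 : Int) ^ (e + 1) = (10 : Int) ^ e * 10 := pow_succ 10 e
      simp only [h, if_pos]
      have ha := ih (t + ((e : Int) + 1) * (min ((10 : Int) ^ (e + 1) - 1) n - (10 : Int) ^ e + 1)) (e + 1) (by omega)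
      have hb := ih (0 + ((e : Int) + 1) * (min ((10 : Int) ^ (e + 1) - 1) n - (10 : Int) ^ e + 1)) (e + 1) (by omega)
      rw [ha, hb]
      ring
    · simp [h]

lemma digitsUpto_add (n t : Int) (e : Nat) : digitsUpto n t e = t + digitsUpto n 0 e :=
  digitsUpto_add_aux n _ t e (le_refl _)

lemma digitsUpto_nonneg_aux (n : Int) : ∀ (m : Nat) (e : Nat), ((n + 1) - (10 : Int) ^ e).toNat ≤ m →
    0 ≤ digitsUpto n 0 e := by
  intro m
  induction m with
  | zero =>
    intro e hm
    have h1 : (1 : Int) ≤ (10 : Int) ^ e := one_le_pow₀ (by norm_num)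
    have hn : ¬ ((10 : Int) ^ e ≤ n) := by omega
    rw [digitsUpto]; simp [hn]
  | succ m ih =>
    intro e hm
    rw [digitsUpto]
    by_cases h : (10 : Int) ^ e ≤ n
    · have h1 : (1 : Int) ≤ (10 : Int) ^ e := one_le_pow₀ (by norm_num)
      have hp : (10 : Int) ^ (e + 1) = (10 : Int) ^ e * 10 := pow_succ 10 e
      have h3 : (0 : Int) ≤ (e : Int) := Int.natCast_nonneg e
      simp only [h, if_pos]
      rw [digitsUpto_add]
      have htail := ih (e + 1) (by omega)
      have hmin : (10 : Int) ^ e - 1 ≤ min ((10 : Int) ^ (e + 1) - 1) n := by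
        apply le_min <;> omega
      nlinarith
    · simp [h]

lemma digitsUpto_nonneg (n : Int) (e : Nat) : 0 ≤ digitsUpto n 0 e :=
  digitsUpto_nonneg_aux n _ e (le_refl _)

lemma digitsUpto_zero_of_lt {n : Int} {e : Nat} (h : n < (10 : Int) ^ e) : digitsUpto n 0 e = 0 := by
  rw [digitsUpto]; simp [not_le.mpr h]

lemma digitsUpto_step {n : Int} {e : Nat} (h : (10 : Int) ^ e ≤ n) :
    digitsUpto n 0 e = ((e : Int) + 1) * (min ((10 : Int) ^ (e + 1) - 1) n - (10 : Int) ^ e + 1) + digitsUpto n 0 (e + 1) := by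
  conv_lhs => rw [digitsUpto]
  simp only [h, if_pos, and_true]
  rw [digitsUpto_add]
  ring

-- invariant: while n still has at least e+1 digits, the total splits as full blocks below e plus the tail
lemma total_split (n : Int) : ∀ e : Nat, (10 : Int) ^ e ≤ n →
    digitsUpto n 0 0 = fullB e + digitsUpto n 0 e := by
  intro e
  induction e with
  | zero => intro _; simp [fullB]
  | succ e ih =>
    intro h
    have he : (10 : Int) ^ e ≤ n :=
      le_trans (pow_le_pow_right₀ (by norm_num) (Nat.le_succ e)) h
    have hmin : min ((10 : Int) ^ (e + 1) - 1) n = (10 : Int) ^ (e + 1) - 1 := by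
      apply min_eq_left; omega
    rw [ih he, digitsUpto_step he, hmin]
    have hp : (10 : Int) ^ (e + 1) = (10 : Int) ^ e * 10 := pow_succ 10 e
    simp only [fullB]
    rw [hp]
    ring

-- the exact total when n has exactly e+1 digits
lemma total_formula {n : Int} {e : Nat} (h1 : (10 : Int) ^ e ≤ n) (h2 : n < (10 : Int) ^ (e + 1)) :
    digitsUpto n 0 0 = fullB e + ((e : Int) + 1) * (n - (10 : Int) ^ e + 1) := by
  rw [total_split n e h1, digitsUpto_step h1, digitsUpto_zero_of_lt h2,
    min_eq_right (by omega)]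
  ring

lemma total_le_fullB (n : Int) : ∀ e : Nat, n < (10 : Int) ^ e → digitsUpto n 0 0 ≤ fullB e := by
  intro e
  induction e with
  | zero =>
    intro h
    rw [digitsUpto]
    simp only [pow_zero] at h ⊢
    simp [not_le.mpr h, fullB]
  | succ e ih =>
    intro h
    rcases lt_or_ge n ((10 : Int) ^ e) with hlt | hge
    · exact le_trans (ih hlt) (le_of_lt (fullB_lt_succ e))
    · rw [total_formula hge h]
      have hp : (10 : Int) ^ (e + 1) = (10 : Int) ^ e * 10 := pow_succ 10 e
      have h3 : (0 : Int) ≤ (e : Int) := Int.natCast_nonneg e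
      simp only [fullB]
      nlinarith

lemma fullB_le_total {n : Int} {e : Nat} (h : (10 : Int) ^ e ≤ n) : fullB e ≤ digitsUpto n 0 0 := by
  rw [total_split n e h]
  have := digitsUpto_nonneg n e
  omega

-- every m ≥ 1 lies in exactly one digit-length block
lemma exists_block (m : Int) (h : 1 ≤ m) : ∃ E : Nat, (10 : Int) ^ E ≤ m ∧ m < (10 : Int) ^ (E + 1) := by
  refine ⟨Nat.log 10 m.toNat, ?_, ?_⟩
  · calc (10 : Int) ^ Nat.log 10 m.toNat = ((10 ^ Nat.log 10 m.toNat : Nat) : Int) := by push_cast; ring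
      _ ≤ (m.toNat : Int) := by exact_mod_cast Nat.pow_log_le_self 10 (by omega)
      _ = m := by omega
  · calc m = (m.toNat : Int) := by omega
      _ < ((10 ^ (Nat.log 10 m.toNat + 1) : Nat) : Int) := by
            exact_mod_cast Nat.lt_pow_succ_log_self (by norm_num) m.toNat
      _ = (10 : Int) ^ (Nat.log 10 m.toNat + 1) := by push_cast; ring

-- the digit count is monotone in the upper bound
lemma digitsUpto_mono {a b : Int} (h : a ≤ b) : digitsUpto a 0 0 ≤ digitsUpto b 0 0 := by
  rcases lt_or_ge a 1 with ha | ha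
  · rw [digitsUpto_zero_of_lt (e := 0) (by simpa using ha)]
    exact digitsUpto_nonneg b 0
  · obtain ⟨E, hE1, hE2⟩ := exists_block a ha
    rcases lt_or_ge b ((10 : Int) ^ (E + 1)) with hb | hb
    · rw [total_formula hE1 hE2, total_formula (le_trans hE1 h) hb]
      have h3 : (0 : Int) ≤ (E : Int) := Int.natCast_nonneg E
      nlinarith
    · exact le_trans (total_le_fullB a (E + 1) hE2) (fullB_le_total hb)

-- total digits below the first (E+1)-digit number are exactly the full blocks
lemma digitsUpto_pow_sub_one (E : Nat) : digitsUpto ((10 : Int) ^ E - 1) 0 0 = fullB E := by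
  cases E with
  | zero =>
    rw [show ((10 : Int) ^ 0 - 1) = 0 by norm_num,
      digitsUpto_zero_of_lt (n := 0) (e := 0) (by norm_num)]
    simp [fullB]
  | succ e =>
    have h1 : (1 : Int) ≤ (10 : Int) ^ e := one_le_pow₀ (by norm_num)
    have hp : (10 : Int) ^ (e + 1) = (10 : Int) ^ e * 10 := pow_succ 10 e
    rw [total_formula (e := e) (by omega) (by omega)]
    simp only [fullB]
    rw [hp]
    ring

-- characterization of A's loop: starting from full-block state e with fullB e < k it stops in a
-- full-block state E whose stopping condition failed, every earlier block having been passed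
lemma Aloop_char (n k : Int) : ∀ (m e : Nat), ((n + 1) - (10 : Int) ^ e).toNat ≤ m → fullB e < k →
    ∃ E : Nat, e ≤ E ∧ searchLoopA n k (fullB e) e (9 * (10 : Int) ^ e) = (fullB E, E, 9 * (10 : Int) ^ E) ∧
      fullB E < k ∧ ¬ (fullB (E + 1) < k ∧ (10 : Int) ^ E ≤ n) := by
  intro m
  induction m with
  | zero =>
    intro e hm hk
    refine ⟨e, le_refl e, ?_, hk, ?_⟩
    · rw [searchLoopA]
      have : ¬ ((10 : Int) ^ e ≤ n) := by
        have := pow10_pos e; omega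
      simp [this]
    · have : ¬ ((10 : Int) ^ e ≤ n) := by
        have := pow10_pos e; omega
      tauto
  | succ m ih =>
    intro e hm hk
    rw [searchLoopA]
    by_cases hc : fullB e + ((e : Int) + 1) * (9 * (10 : Int) ^ e) < k ∧ (10 : Int) ^ e ≤ n
    · have hstep : fullB e + ((e : Int) + 1) * (9 * (10 : Int) ^ e) = fullB (e + 1) := by
        simp only [fullB]; ring
      have hp : (10 : Int) ^ (e + 1) = (10 : Int) ^ e * 10 := pow_succ 10 e
      have h1 : (1 : Int) ≤ (10 : Int) ^ e := one_le_pow₀ (by norm_num)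
      obtain ⟨E, hE1, hE2, hE3, hE4⟩ := ih (e + 1) (by omega) (by omega)
      refine ⟨E, by omega, ?_, hE3, hE4⟩
      simp only [hc, if_pos]
      rw [hstep] at *
      have hcnt : 9 * (10 : Int) ^ e * 10 = 9 * (10 : Int) ^ (e + 1) := by rw [hp]; ring
      rw [hcnt]
      exact hE2
    · refine ⟨e, le_refl e, ?_, hk, ?_⟩
      · simp [hc]
      · intro ⟨h1, h2⟩
        apply hc
        refine ⟨?_, h2⟩
        have : fullB e + ((e : Int) + 1) * (9 * (10 : Int) ^ e) = fullB (e + 1) := by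
          simp only [fullB]; ring
        omega

-- correctness of B's binary search: it returns the least m with digitsUpto m ≥ k
lemma bsearch_correct (k : Int) : ∀ (m : Nat) (lo hi : Int), (hi - lo).toNat ≤ m → lo ≤ hi →
    digitsUpto (lo - 1) 0 0 < k → k ≤ digitsUpto hi 0 0 →
    digitsUpto (bsearchB k lo hi - 1) 0 0 < k ∧ k ≤ digitsUpto (bsearchB k lo hi) 0 0 ∧
      lo ≤ bsearchB k lo hi ∧ bsearchB k lo hi ≤ hi := by
  intro m
  induction m with
  | zero =>
    intro lo hi hm hle hlo hhi
    have heq : lo = hi := by omega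
    rw [bsearchB]
    simp only [show ¬ (lo < hi) by omega, if_false]
    subst heq
    exact ⟨hlo, hhi, le_refl _, le_refl _⟩
  | succ m ih =>
    intro lo hi hm hle hlo hhi
    rw [bsearchB]
    by_cases h : lo < hi
    · have hd : PySem.Int.floordiv (lo + hi) 2 = (lo + hi) / 2 :=
        PySem.Int.floordiv_eq_ediv_of_pos (by norm_num)
      simp only [h, if_pos, hd]
      by_cases hc : k ≤ digitsUpto ((lo + hi) / 2) 0 0
      · simp only [hc, if_pos]
        have := ih lo ((lo + hi) / 2) (by omega) (by omega) hlo hc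
        refine ⟨this.1, this.2.1, this.2.2.1, by omega⟩
      · simp only [hc, if_neg, if_false]
        have := ih ((lo + hi) / 2 + 1) hi (by omega) (by omega)
          (by simpa using not_le.mp hc) hhi
        refine ⟨this.1, this.2.1, by omega, this.2.2.2⟩
    · simp only [h, if_false]
      have heq : lo = hi := by omega
      subst heq
      exact ⟨hlo, hhi, le_refl _, le_refl _⟩

-- the number containing position k is unique
lemma locate_unique {a b k : Int}
    (ha1 : digitsUpto (a - 1) 0 0 < k) (ha2 : k ≤ digitsUpto a 0 0)
    (hb1 : digitsUpto (b - 1) 0 0 < k) (hb2 : k ≤ digitsUpto b 0 0) : a = b := by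
  rcases lt_trichotomy a b with h | h | h
  · have := digitsUpto_mono (show a ≤ b - 1 by omega)
    omega
  · exact h
  · have := digitsUpto_mono (show b ≤ a - 1 by omega)
    omega

-- ===== VERDICT (by name: the statement is the Claim_ definition above) =====
theorem search_spec : Claim_equal_search := by
  intro n k _ hpre
  unfold Pre_search at hpre
  unfold Spec_search search search_alt
  obtain ⟨E, _, hA, hAk, hAstop⟩ :=
    Aloop_char n k ((n + 1) - (10 : Int) ^ 0).toNat 0 (le_refl _) (by simp [fullB]; omega)
  simp only [fullB, pow_zero, mul_one] at hA
  rw [hA]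
  set T := digitsUpto n 0 0 with hT
  by_cases hTk : T < k
  · -- both return -1
    have hcheck : fullB E + ((E : Int) + 1) * (n - (10 : Int) ^ E + 1) < k := by
      rcases lt_or_ge n ((10 : Int) ^ E) with hn | hn
      · have h3 : (0 : Int) ≤ (E : Int) := Int.natCast_nonneg E
        nlinarith
      · have hnk : k ≤ fullB (E + 1) := not_lt.mp (fun ha => hAstop ⟨ha, hn⟩)
        have hn2 : n < (10 : Int) ^ (E + 1) := by
          by_contra hge
          have := fullB_le_total (n := n) (e := E + 1) (by omega)
          omega
        have := total_formula hn hn2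
        omega
    simp [hcheck, hTk]
  · -- both locate the digit
    have hTk' : k ≤ T := by omega
    have hAfull : k ≤ fullB (E + 1) := by
      by_contra hlt
      have hn : (10 : Int) ^ (E + 1) ≤ n := by
        by_contra hge
        have := total_le_fullB n (E + 1) (by omega)
        omega
      have hn' : (10 : Int) ^ E ≤ n :=
        le_trans (pow_le_pow_right₀ (by norm_num) (Nat.le_succ E)) hn
      exact hAstop ⟨by omega, hn'⟩
    have hnE : (10 : Int) ^ E ≤ n := by
      by_contra hge
      have := total_le_fullB n E (by omega)
      omega
    have hcheck : ¬ (fullB E + ((E : Int) + 1) * (n - (10 : Int) ^ E + 1) < k) := by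
      rcases lt_or_ge n ((10 : Int) ^ (E + 1)) with hn2 | hn2
      · have := total_formula hnE hn2
        omega
      · have hp : (10 : Int) ^ (E + 1) = (10 : Int) ^ E * 10 := pow_succ 10 E
        have h3 : (0 : Int) ≤ (E : Int) := Int.natCast_nonneg E
        have : fullB (E + 1) = fullB E + ((E : Int) + 1) * 9 * (10 : Int) ^ E := by
          simp only [fullB]
        nlinarith
    -- arithmetic of A's located number
    set num : Int := (E : Int) + 1 with hnum
    have hnumpos : (0 : Int) < num := by positivity
    set t : Int := k - fullB E - 1 with ht
    have ht0 : 0 ≤ t := by omega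
    have hdiv : PySem.Int.floordiv t num = t / num :=
      PySem.Int.floordiv_eq_ediv_of_pos hnumpos
    have hmodeq : PySem.Int.mod t num = t % num :=
      PySem.Int.mod_eq_emod_of_pos hnumpos
    set q : Int := t / num with hq
    set r : Int := t % num with hr
    have hdecomp : num * q + r = t := Int.ediv_add_emod t num
    have hr0 : 0 ≤ r := Int.emod_nonneg t (by omega)
    have hrlt : r < num := Int.emod_lt_of_pos t hnumpos
    have hq0 : 0 ≤ q := Int.ediv_nonneg ht0 (le_of_lt hnumpos)
    set numberA : Int := (10 : Int) ^ E + q with hnumberA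
    have hE1 : (1 : Int) ≤ (10 : Int) ^ E := one_le_pow₀ (by norm_num)
    have hp : (10 : Int) ^ (E + 1) = (10 : Int) ^ E * 10 := pow_succ 10 E
    have h3 : (0 : Int) ≤ (E : Int) := Int.natCast_nonneg E
    have hblock : fullB (E + 1) = fullB E + num * 9 * (10 : Int) ^ E := by
      simp only [fullB, hnum]
    -- numberA lies in block E and numberA ≤ n
    have hnA2 : numberA < (10 : Int) ^ (E + 1) := by
      have : t < num * (9 * (10 : Int) ^ E) := by
        have : t ≤ fullB (E + 1) - fullB E - 1 := by omega
        nlinarith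
      have hqlt : q < 9 * (10 : Int) ^ E := by nlinarith
      omega
    have hnAn : numberA ≤ n := by
      rcases lt_or_ge n ((10 : Int) ^ (E + 1)) with hn2 | hn2
      · have hTf := total_formula hnE hn2
        have hlt : t < num * (n - (10 : Int) ^ E + 1) := by omega
        have hqle : q ≤ n - (10 : Int) ^ E := by nlinarith
        omega
      · omega
    -- digitsUpto at numberA and numberA - 1
    have hDnA : digitsUpto numberA 0 0 = fullB E + num * (q + 1) := by
      rw [total_formula (n := numberA) (e := E) (by omega) hnA2]
      simp only [hnumberA, hnum]; ring
    have hDnA1 : digitsUpto (numberA - 1) 0 0 = fullB E + num * q := by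
      rcases eq_or_lt_of_le hq0 with hq' | hq'
      · have : numberA - 1 = (10 : Int) ^ E - 1 := by omega
        rw [this, digitsUpto_pow_sub_one]
        rw [← hq']; ring
      · rw [total_formula (n := numberA - 1) (e := E) (by omega) (by omega)]
        simp only [hnumberA, hnum]; ring
    have hlocA1 : digitsUpto (numberA - 1) 0 0 < k := by
      rw [hDnA1]; omega
    have hlocA2 : k ≤ digitsUpto numberA 0 0 := by
      rw [hDnA]; nlinarith
    -- B's binary search lands on the same number
    have hn1 : (1 : Int) ≤ n := by
      by_contra hn1
      have : T = 0 := digitsUpto_zero_of_lt (e := 0) (by push_neg at hn1; simpa using hn1)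
      omega
    have hzero : digitsUpto (1 - 1 : Int) 0 0 < k := by
      rw [show (1 - 1 : Int) = 0 by ring, digitsUpto_zero_of_lt (e := 0) (by norm_num)]
      omega
    obtain ⟨hB1, hB2, _, _⟩ :=
      bsearch_correct k (n - 1).toNat 1 n (by omega) hn1 hzero hTk'
    have hmeq : bsearchB k 1 n = numberA := locate_unique hB1 hB2 hlocA1 hlocA2
    -- both expressions coincide
    have hidx : k - digitsUpto (bsearchB k 1 n - 1) 0 0 - 1 = PySem.Int.mod t num := by
      rw [hmeq, hDnA1, hmodeq]; omega
    have hcheck' : ¬ fullB E + ((E : Int) + 1) * (n - (10 : Int) ^ E + 1) < k := hcheck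
    simp only [hcheck', if_false]
    rw [hidx, hmeq,
      show PySem.Int.floordiv (k - fullB E - 1) ((E : Int) + 1) = q from by rw [← ht, ← hnum]; exact hdiv,
      show PySem.Int.mod (k - fullB E - 1) ((E : Int) + 1) = PySem.Int.mod t num from by rw [← ht, ← hnum],
      ← hnumberA, if_neg (show ¬ (k < 1 ∨ T < k) from by omega)]
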